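-- pv_equiv track=rewrite | github.com/morozov1982/snippets | ___test/0000-Python-Euler/0012-highly_divisible_triangular_number.py | gen_triangle_num_list
-- ===== SOURCE A (Python) =====
-- def gen_triangle_num_list(list_len=1):
--     tr_list = [1]
--     prev = None
--     cur = None
--     for i in range(1, list_len):
--         prev = tr_list[i-1]
--         cur = i+prev+1
--         tr_list.append(cur)
--     return tr_list
-- ===== SOURCE B (Python) =====
-- def gen_triangle_num_list(list_len=1):
--     return [(k + 1) * (k + 2) // 2 for k in range(max(list_len, 1))]
-- ===== Notes on version B (the rewrite author's own statement) =====
-- stated objective: idiomatic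
-- what changed: Replaces the running-sum loop with prev/cur state by a closed-form comprehension that computes each triangular number directly from its index via integer division, clamping the count to at least one to reproduce the always-present leading element.
import Mathlib
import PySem

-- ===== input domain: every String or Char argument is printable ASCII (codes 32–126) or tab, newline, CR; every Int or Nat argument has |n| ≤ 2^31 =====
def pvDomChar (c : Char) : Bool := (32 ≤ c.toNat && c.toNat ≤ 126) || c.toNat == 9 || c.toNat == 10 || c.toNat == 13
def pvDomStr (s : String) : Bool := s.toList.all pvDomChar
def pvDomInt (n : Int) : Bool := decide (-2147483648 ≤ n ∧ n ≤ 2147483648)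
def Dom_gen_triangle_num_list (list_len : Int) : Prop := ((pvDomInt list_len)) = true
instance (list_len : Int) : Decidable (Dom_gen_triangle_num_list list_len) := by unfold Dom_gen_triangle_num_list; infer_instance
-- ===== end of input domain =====

-- B replaces A's running-sum loop by a closed-form comprehension T(k+1)=(k+1)(k+2)//2 (idiomatic; same cost).

-- ===== PORT A =====
-- tr_list[i-1] is always in range here (i ranges over 1..len-1 and tr_list has i elements),
-- so the IndexError branch of Python indexing is unreachable; ported with pyGetD default 0.
def gen_triangle_num_list (list_len : Int) : List Int :=
  (PySem.List.pyRange 1 list_len 1).foldl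
    (fun tr_list i =>
      let prev := PySem.List.pyGetD tr_list (i - 1) 0
      let cur := i + prev + 1
      tr_list ++ [cur])
    [1]

-- ===== PORT B =====
def gen_triangle_num_list_alt (list_len : Int) : List Int :=
  (PySem.List.pyRange 0 (max list_len 1) 1).map
    (fun k => PySem.Int.floordiv ((k + 1) * (k + 2)) 2)

-- ===== PRECONDITION & SPEC =====
def Spec_gen_triangle_num_list (list_len : Int) (out : List Int) : Prop := out = gen_triangle_num_list_alt list_len
instance (list_len : Int) (out : List Int) : Decidable (Spec_gen_triangle_num_list list_len out) := by unfold Spec_gen_triangle_num_list; infer_instance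

-- ===== CLAIM (what is proved, stated in full; the proofs are below) =====
def Claim_equal_gen_triangle_num_list : Prop := ∀ (list_len : Int), Dom_gen_triangle_num_list list_len → Spec_gen_triangle_num_list list_len (gen_triangle_num_list list_len)

-- ===== LEMMAS AND PROOFS =====

lemma tri_eq (m q : Int) (h : m * (m + 1) = 2 * q) :
    PySem.Int.floordiv (m * (m + 1)) 2 = q := by
  rw [PySem.Int.floordiv_eq_iff_of_pos (b:=2) (by omega)]
  omega

lemma tri_step (m : Int) (hm : 0 ≤ m) :
    PySem.Int.floordiv ((m + 1) * (m + 2)) 2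
      = m + PySem.Int.floordiv (m * (m + 1)) 2 + 1 := by
  obtain ⟨q, hq⟩ : ∃ q, m * (m + 1) = 2 * q := by
    rcases Int.even_or_odd m with ⟨c, hc⟩ | ⟨c, hc⟩
    · exact ⟨c * (m + 1), by subst hc; ring⟩
    · exact ⟨m * (c + 1), by subst hc; ring⟩
  rw [tri_eq m q hq]
  have h2 : (m + 1) * (m + 2) = 2 * (q + m + 1) := by
    have : (m + 1) * (m + 2) = m * (m + 1) + 2 * (m + 1) := by ring
    omega
  have := tri_eq (m + 1) (q + m + 1) (by rw [show (m+1)*((m+1)+1) = (m+1)*(m+2) by ring]; exact h2)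
  rw [show (m+1)*((m+1)+1) = (m+1)*(m+2) by ring] at this
  rw [this]; ring

lemma key (n : Int) (hn : 1 ≤ n) :
    gen_triangle_num_list n = gen_triangle_num_list_alt n := by
  obtain ⟨k, rfl⟩ : ∃ k : Nat, n = 1 + (k : Int) := ⟨(n - 1).toNat, by omega⟩
  clear hn
  induction k with
  | zero => decide
  | succ k ih =>
    unfold gen_triangle_num_list gen_triangle_num_list_alt at *
    have h1 : (1 : Int) + ((k + 1 : Nat) : Int) = (1 + (k : Int)) + 1 := by push_cast; ring
    have h2 : max ((1 + (k : Int)) + 1) 1 = max (1 + (k : Int)) 1 + 1 := by omega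
    rw [h1, PySem.List.pyRange_one_succ_right (by omega), h2,
        PySem.List.pyRange_one_succ_right (by omega),
        List.foldl_append, List.map_append, ih]
    simp only [List.foldl_cons, List.foldl_nil, List.map_cons, List.map_nil]
    congr 1
    have hmax : max (1 + (k : Int)) 1 = 1 + (k : Int) := by omega
    have hlen : ((PySem.List.pyRange 0 (max (1 + (k : Int)) 1) 1).map
        (fun k => PySem.Int.floordiv ((k + 1) * (k + 2)) 2)).length = k + 1 := by
      rw [hmax]
      simp [PySem.List.length_pyRange_one]
      omega
    have hget : PySem.List.pyGetD
        ((PySem.List.pyRange 0 (max (1 + (k : Int)) 1) 1).map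
          (fun k => PySem.Int.floordiv ((k + 1) * (k + 2)) 2))
        ((1 + (k : Int)) - 1) 0
        = PySem.Int.floordiv (((k : Int) + 1) * ((k : Int) + 2)) 2 := by
      rw [hmax, show (1 + (k : Int)) - 1 = (k : Int) by ring,
          PySem.List.pyGetD_map_pyRange_of_nonneg _ _ _ _ (by omega) (by omega)]
    rw [hget, show max (1 + (k : Int)) 1 = (k : Int) + 1 by omega]
    have := tri_step ((k : Int) + 1) (by omega)
    rw [show ((k:Int)+1)*((k:Int)+1+1) = ((k:Int)+1)*((k:Int)+2) by ring,
        show ((k:Int)+1+1)*((k:Int)+1+2) = ((k:Int)+2)*((k:Int)+3) by ring] at this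
    rw [show ((k:Int)+1+1)*((k:Int)+1+2) = ((k:Int)+2)*((k:Int)+3) by ring, this]
    congr 1; ring

lemma key_small (n : Int) (hn : n ≤ 1) :
    gen_triangle_num_list n = gen_triangle_num_list_alt n := by
  unfold gen_triangle_num_list gen_triangle_num_list_alt
  rw [PySem.List.pyRange_one_eq_nil hn,
      show max n 1 = 1 by omega]
  decide

-- ===== VERDICT (by name: the statement is the Claim_ definition above) =====
theorem gen_triangle_num_list_spec : Claim_equal_gen_triangle_num_list := by
  intro n _
  unfold Spec_gen_triangle_num_list
  rcases le_or_gt n 1 with h | h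
  · exact key_small n h
  · exact key n (by omega)
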